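-- pv_equiv track=rewrite | github.com/madangel2/advent-of-code | 2025/day2.py | generate_part1_nums
-- ===== SOURCE A (Python) =====
-- def generate_part1_nums(max_val):
--     candidates = []
--     max_s = str(max_val)
--     max_len = len(max_s)
--
--     # Iterate through even lengths 2, 4, 6...
--     for length in range(2, max_len + 1, 2):
--         half_len = length // 2
--         start = 10**(half_len - 1)
--         end = 10**half_len
--
--         for i in range(start, end):
--             s = str(i)
--             # Create palindrome-like repetition: "123" -> "123123"
--             cand_s = s + s
--             cand = int(cand_s)
--             if cand > max_val:
--                 break
--             candidates.append(cand)
--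
--     return candidates
-- ===== SOURCE B (Python) =====
-- def generate_part1_nums(max_val):
--     candidates = []
--     i = 1
--     while True:
--         cand = i * (10 ** len(str(i)) + 1)
--         if cand > max_val:
--             return candidates
--         candidates.append(cand)
--         i += 1
-- ===== Notes on version B (the rewrite author's own statement) =====
-- stated objective: simpler
-- what changed: Replaces the nested even-length/half-prefix loops that build each candidate by string concatenation and reparsing (int(str(i)+str(i))) with a single flat while-loop over i = 1,2,3,... that forms the candidate arithmetically as i*(10**len(str(i))+1) and stops at the first candidate exceeding max_val; this emits the same strictly increasing sequence because candidates grow monotonically with i.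
import Mathlib
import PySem

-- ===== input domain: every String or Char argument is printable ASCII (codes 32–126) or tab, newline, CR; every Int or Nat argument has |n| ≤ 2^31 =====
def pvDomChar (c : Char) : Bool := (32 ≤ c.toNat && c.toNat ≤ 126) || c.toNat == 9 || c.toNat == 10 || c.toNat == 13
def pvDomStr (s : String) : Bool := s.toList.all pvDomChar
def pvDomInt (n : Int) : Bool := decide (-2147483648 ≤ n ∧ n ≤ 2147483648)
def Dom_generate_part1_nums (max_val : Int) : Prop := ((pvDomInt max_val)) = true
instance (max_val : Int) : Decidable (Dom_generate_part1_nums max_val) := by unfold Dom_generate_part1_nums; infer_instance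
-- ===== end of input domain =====

-- B replaces A's nested even-length/half-prefix loops with string concat + reparse by one flat
-- while-loop forming each candidate arithmetically; objective: simpler (not claimed faster).

-- ===== PORT A =====
-- int(cand_s): cand_s here is always str(i)+str(i) for i >= 1, a nonempty canonical decimal
-- digit string, on which Python's int() is exactly this Horner fold over the digit characters;
-- it is ported by hand (exact on such strings) because PySem.Int.ofStr?'s parser is a private
-- definition whose equations are not available to proofs.
def pvDigitsVal (cs : List Char) : Int :=
  cs.foldl (fun a c => 10 * a + ((c.toNat : Int) - 48)) 0

-- the inner 'for i in range(start, end): ... break ... append' loop of A (break = return acc)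
def pvInner (max_val : Int) : List Int → List Int → List Int
  | [], acc => acc
  | i :: rest, acc =>
    let s := PySem.Int.toChars i
    let cand_s := s ++ s
    let cand := pvDigitsVal cand_s
    if cand > max_val then acc
    else pvInner max_val rest (acc ++ [cand])

def generate_part1_nums (max_val : Int) : List Int :=
  let max_s := PySem.Int.toChars max_val
  let max_len := PySem.Chars.len max_s
  (PySem.List.pyRange 2 (max_len + 1) 2).foldl
    (fun candidates length =>
      let half_len := PySem.Int.floordiv length 2
      let start := (10 : Int) ^ (half_len - 1).toNat
      let stop := (10 : Int) ^ half_len.toNat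
      pvInner max_val (PySem.List.pyRange start stop 1) candidates)
    []

-- ===== PORT B =====
-- while True: cand = i * (10 ** len(str(i)) + 1); if cand > max_val: return out; append; i += 1
def pvAltLoop (max_val i : Int) (acc : List Int) (hi : 1 ≤ i) : List Int :=
  let cand := i * ((10 : Int) ^ (PySem.Chars.len (PySem.Int.toChars i)).toNat + 1)
  if h : cand > max_val then acc
  else pvAltLoop max_val (i + 1) (acc ++ [cand]) (by omega)
termination_by (max_val + 1 - i).toNat
decreasing_by
  have hpow : (1 : Int) ≤ (10 : Int) ^ (PySem.Chars.len (PySem.Int.toChars i)).toNat :=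
    one_le_pow₀ (by norm_num)
  have h2 : i * 2 ≤ i * ((10 : Int) ^ (PySem.Chars.len (PySem.Int.toChars i)).toNat + 1) :=
    mul_le_mul_of_nonneg_left (by omega) (by omega)
  simp only [not_lt] at h
  omega

def generate_part1_nums_alt (max_val : Int) : List Int :=
  pvAltLoop max_val 1 [] le_rfl

-- ===== PRECONDITION & SPEC =====
def Spec_generate_part1_nums (max_val : Int) (out : List Int) : Prop := out = generate_part1_nums_alt max_val
instance (max_val : Int) (out : List Int) : Decidable (Spec_generate_part1_nums max_val out) := by unfold Spec_generate_part1_nums; infer_instance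

-- ===== CLAIM (what is proved, stated in full; the proofs are below) =====
def Claim_equal_generate_part1_nums : Prop := ∀ (max_val : Int), Dom_generate_part1_nums max_val → Spec_generate_part1_nums max_val (generate_part1_nums max_val)

-- ===== LEMMAS AND PROOFS =====

def pvRep (n : Nat) : List Char :=
  if n = 0 then ['0'] else ((Nat.digits 10 n).map Nat.digitChar).reverse

theorem pvRep_split {n : Nat} (h : 10 ≤ n) :
    pvRep n = pvRep (n / 10) ++ [Nat.digitChar (n % 10)] := by
  have h10 : 1 ≤ n / 10 := Nat.one_le_div_iff (by norm_num) |>.mpr h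
  unfold pvRep
  rw [if_neg (by omega), if_neg (by omega), Nat.digits_def' (by norm_num) (by omega)]
  simp

theorem pvCoreStep (f n : Nat) (l : List Char) :
    Nat.toDigitsCore 10 (f + 1) n l
      = if n / 10 = 0 then (n % 10).digitChar :: l
        else Nat.toDigitsCore 10 f (n / 10) ((n % 10).digitChar :: l) := by
  conv_lhs => rw [Nat.toDigitsCore]

theorem pvToDigitsCore_eq (fuel : Nat) : ∀ (n : Nat) (l : List Char), n < 10 ^ (fuel + 1) →
    Nat.toDigitsCore 10 (fuel + 1) n l = pvRep n ++ l := by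
  induction fuel with
  | zero =>
    intro n l hn
    have hn10 : n < 10 := by simpa using hn
    have hd : n / 10 = 0 := Nat.div_eq_of_lt hn10
    rw [pvCoreStep, if_pos hd]
    have hm : n % 10 = n := Nat.mod_eq_of_lt hn10
    unfold pvRep
    rcases Nat.eq_zero_or_pos n with h0 | h0
    · subst h0; simp [Nat.digitChar]
    · rw [if_neg (by omega), Nat.digits_def' (by norm_num) h0, hd, hm]
      simp
  | succ fuel ih =>
    intro n l hn
    by_cases hd : n / 10 = 0
    · have hlt : n < 10 := by
        rcases Nat.lt_or_ge n 10 with h | h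
        · exact h
        · exact absurd hd (by omega)
      have hm : n % 10 = n := Nat.mod_eq_of_lt hlt
      rw [pvCoreStep, if_pos hd]
      unfold pvRep
      rcases Nat.eq_zero_or_pos n with h0 | h0
      · subst h0; simp [Nat.digitChar]
      · rw [if_neg (by omega), Nat.digits_def' (by norm_num) h0, hd, hm]
        simp
    · have h10 : 10 ≤ n := by
        rcases Nat.lt_or_ge n 10 with h | h
        · exact absurd (Nat.div_eq_of_lt h) hd
        · exact h
      rw [pvCoreStep, if_neg hd]
      rw [ih (n / 10) _ (by
        rw [Nat.div_lt_iff_lt_mul (by norm_num)]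
        calc n < 10 ^ (fuel + 1 + 1) := hn
          _ = 10 ^ (fuel + 1) * 10 := by ring)]
      rw [pvRep_split h10]
      simp

theorem pvToDigits_eq (n : Nat) : Nat.toDigits 10 n = pvRep n := by
  have h : n < 10 ^ (n + 1) := lt_of_lt_of_le (Nat.lt_pow_self (by norm_num))
    (Nat.pow_le_pow_right (by norm_num) (by omega))
  simpa using pvToDigitsCore_eq n n [] h

theorem pvToChars_eq {i : Int} (h : 0 ≤ i) : PySem.Int.toChars i = pvRep i.toNat := by
  unfold PySem.Int.toChars
  rw [if_neg (by omega), pvToDigits_eq]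

theorem pvRep_len {n : Nat} (h : 1 ≤ n) : (pvRep n).length = Nat.log 10 n + 1 := by
  unfold pvRep
  rw [if_neg (by omega)]
  simp [Nat.digits_len 10 n (by norm_num) (by omega)]

theorem pvRep_val (n : Nat) : ∀ a : Int,
    (pvRep n).foldl (fun a c => 10 * a + ((c.toNat : Int) - 48)) a
      = a * 10 ^ (pvRep n).length + n := by
  induction n using Nat.strong_induction_on with
  | _ n ih =>
    intro a
    by_cases hlt : n < 10
    · have hrep : pvRep n = [Nat.digitChar n] := by
        unfold pvRep
        rcases Nat.eq_zero_or_pos n with h0 | h0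
        · subst h0; simp [Nat.digitChar]
        · rw [if_neg (by omega), Nat.digits_def' (by norm_num) h0,
            Nat.div_eq_of_lt hlt, Nat.mod_eq_of_lt hlt]
          simp
      rw [hrep]
      have hc : ((Nat.digitChar n).toNat : Int) = 48 + n := by
        interval_cases n <;> decide
      simp [List.foldl, hc]
      ring
    · push_neg at hlt
      rw [pvRep_split hlt, List.foldl_append, List.length_append]
      rw [ih (n / 10) (by omega) a]
      have hc : ((Nat.digitChar (n % 10)).toNat : Int) = 48 + (n % 10 : Nat) := by
        have : n % 10 < 10 := Nat.mod_lt _ (by norm_num)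
        interval_cases h : n % 10 <;> simp [h] <;> decide
      simp only [List.foldl, List.length_cons, List.length_nil, hc]
      have hdm : (10 : Int) * (n / 10 : Nat) + (n % 10 : Nat) = (n : Int) := by
        have := Nat.div_add_mod n 10
        push_cast
        omega
      ring_nf
      push_cast
      ring_nf
      omega

def pvCand (i : Int) : Int := i * ((10 : Int) ^ (PySem.Int.toChars i).length + 1)

theorem pvCand_altForm (i : Int) :
    i * ((10 : Int) ^ (PySem.Chars.len (PySem.Int.toChars i)).toNat + 1) = pvCand i := by
  unfold pvCand
  rw [PySem.Chars.len_eq]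
  simp

theorem pvParse_eq_cand {i : Int} (h : 1 ≤ i) :
    pvDigitsVal (PySem.Int.toChars i ++ PySem.Int.toChars i) = pvCand i := by
  have h0 : 0 ≤ i := by omega
  rw [pvToChars_eq h0]
  unfold pvDigitsVal pvCand
  rw [List.foldl_append, pvRep_val, pvRep_val, pvToChars_eq h0]
  have : ((i.toNat : Int)) = i := Int.toNat_of_nonneg h0
  rw [this]
  ring

theorem pvCand_mono {i j : Int} (h1 : 1 ≤ i) (hij : i ≤ j) : pvCand i ≤ pvCand j := by
  have h0i : 0 ≤ i := by omega
  have h0j : 0 ≤ j := by omega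
  have hlen : (PySem.Int.toChars i).length ≤ (PySem.Int.toChars j).length := by
    rw [pvToChars_eq h0i, pvToChars_eq h0j,
      pvRep_len (by omega : 1 ≤ i.toNat), pvRep_len (by omega : 1 ≤ j.toNat)]
    exact Nat.succ_le_succ (Nat.log_mono_right (by omega))
  unfold pvCand
  have hp : (10:Int) ^ (PySem.Int.toChars i).length ≤ 10 ^ (PySem.Int.toChars j).length :=
    pow_le_pow_right₀ (by norm_num) hlen
  have hpi : (0:Int) < 10 ^ (PySem.Int.toChars i).length := by positivity
  nlinarith

-- bounds of the representation length
theorem pvCand_pow_gt {H : Nat} : (10:Int) ^ (2 * H + 1) < pvCand ((10:Int) ^ H) := by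
  have h0 : (0:Int) ≤ (10:Int) ^ H := by positivity
  have htn : ((10:Int) ^ H).toNat = 10 ^ H := by
    rw [show ((10:Int) ^ H) = ((10 ^ H : Nat) : Int) by push_cast; ring, Int.toNat_natCast]
  have hlen : ((PySem.Int.toChars ((10:Int) ^ H))).length = H + 1 := by
    rw [pvToChars_eq h0, pvRep_len (by rw [htn]; exact Nat.one_le_two_pow.trans (Nat.pow_le_pow_left (by norm_num) _)), htn, Nat.log_pow (by norm_num)]
  unfold pvCand
  rw [hlen]
  have : (10:Int) ^ H * 10 ^ (H + 1) = 10 ^ (2 * H + 1) := by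
    rw [← pow_add]; ring_nf
  nlinarith [pow_pos (show (0:Int) < 10 by norm_num) H,
    pow_pos (show (0:Int) < 10 by norm_num) (H+1)]

def pvEmit (mv : Int) (js : List Int) : List Int :=
  (js.takeWhile (fun i => decide (pvCand i ≤ mv))).map pvCand

theorem pvInner_emit (mv : Int) (js : List Int) : ∀ (acc : List Int),
    (∀ j ∈ js, 1 ≤ j) →
    pvInner mv js acc = acc ++ pvEmit mv js := by
  induction js with
  | nil => intro acc _; simp [pvInner, pvEmit]
  | cons i rest ih =>
    intro acc hpos
    have hi : 1 ≤ i := hpos i (by simp)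
    rw [pvInner]
    simp only [pvParse_eq_cand hi]
    by_cases hgt : pvCand i > mv
    · rw [if_pos hgt]
      have : pvEmit mv (i :: rest) = [] := by
        unfold pvEmit
        rw [List.takeWhile_cons_of_neg (by simp; omega)]
        simp
      rw [this]; simp
    · rw [if_neg hgt]
      rw [ih _ (fun j hj => hpos j (by simp [hj]))]
      have : pvEmit mv (i :: rest) = pvCand i :: pvEmit mv rest := by
        unfold pvEmit
        rw [List.takeWhile_cons_of_pos (by simp; omega)]
        simp
      rw [this]; simp


theorem pvAltLoop_emit (mv : Int) (T : Int) (hT : mv < pvCand T) :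
    ∀ (fuel : Nat) (i : Int) (acc : List Int) (h1 : 1 ≤ i), i ≤ T → (T - i).toNat ≤ fuel →
      pvAltLoop mv i acc h1 = acc ++ pvEmit mv (PySem.List.pyRange i T 1) := by
  intro fuel
  induction fuel with
  | zero =>
    intro i acc h1 hiT hf
    have hiT' : i = T := by omega
    subst hiT'
    rw [pvAltLoop]
    simp only [pvCand_altForm]
    rw [dif_pos hT]
    have : PySem.List.pyRange i i 1 = [] := by
      rw [PySem.List.pyRange_of_pos _ _ (by norm_num)]
      simp
    rw [this]; simp [pvEmit]
  | succ fuel ih =>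
    intro i acc h1 hiT hf
    rw [pvAltLoop]
    simp only [pvCand_altForm]
    by_cases hgt : pvCand i > mv
    · rw [dif_pos hgt]
      rcases eq_or_lt_of_le hiT with hEq | hlt
      · subst hEq
        have : PySem.List.pyRange i i 1 = [] := by
          rw [PySem.List.pyRange_of_pos _ _ (by norm_num)]; simp
        rw [this]; simp [pvEmit]
      · rw [PySem.List.pyRange_one_cons hlt]
        unfold pvEmit
        rw [List.takeWhile_cons_of_neg (by simp; omega)]
        simp
    · rw [dif_neg hgt]
      have hiTlt : i < T := by
        rcases eq_or_lt_of_le hiT with hEq | hlt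
        · subst hEq; omega
        · exact hlt
      rw [ih (i + 1) _ (by omega) (by omega) (by omega)]
      rw [PySem.List.pyRange_one_cons hiTlt]
      unfold pvEmit
      rw [List.takeWhile_cons_of_pos (by simp; omega)]
      simp

theorem pvEmit_nil_of_head_fail (mv a b : Int) (hab : a < b) (hfail : mv < pvCand a) :
    pvEmit mv (PySem.List.pyRange a b 1) = [] := by
  rw [PySem.List.pyRange_one_cons hab]
  unfold pvEmit
  rw [List.takeWhile_cons_of_neg (by simp; omega)]
  simp

theorem pvBlocks_emit (mv : Int) : ∀ H : Nat,
    (List.range H).foldl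
      (fun acc k => acc ++ pvEmit mv (PySem.List.pyRange ((10:Int) ^ k) ((10:Int) ^ (k + 1)) 1)) []
      = pvEmit mv (PySem.List.pyRange 1 ((10:Int) ^ H) 1) := by
  intro H
  induction H with
  | zero =>
    simp [pvEmit, PySem.List.pyRange_of_pos _ _ (show (0:Int) < 1 by norm_num)]
  | succ H ih =>
    rw [List.range_succ, List.foldl_append, ih]
    simp only [List.foldl_cons, List.foldl_nil]
    have h1H : (1:Int) ≤ 10 ^ H := one_le_pow₀ (by norm_num)
    have hHH : (10:Int) ^ H ≤ 10 ^ (H + 1) := by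
      have : (10:Int) ^ H * 1 ≤ 10 ^ H * 10 := by nlinarith
      rw [pow_succ]; nlinarith
    rw [PySem.List.pyRange_one_append 1 ((10:Int) ^ H) ((10:Int) ^ (H + 1)) h1H hHH]
    set xs := PySem.List.pyRange 1 ((10:Int) ^ H) 1 with hxs
    set ys := PySem.List.pyRange ((10:Int) ^ H) ((10:Int) ^ (H + 1)) 1 with hys
    by_cases hall : ∀ j ∈ xs, pvCand j ≤ mv
    · unfold pvEmit
      rw [List.takeWhile_append]
      rw [if_pos (by rw [List.takeWhile_eq_self_iff.mpr (by intro x hx; simpa using hall x hx)])]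
      rw [List.takeWhile_eq_self_iff.mpr (by intro x hx; simpa using hall x hx), List.map_append]
    · push_neg at hall
      obtain ⟨j, hjmem, hjfail⟩ := hall
      have hjb : 1 ≤ j ∧ j < (10:Int) ^ H := by
        have := (PySem.List.mem_pyRange_one).mp hjmem
        exact ⟨this.1, this.2⟩
      have hfailH : mv < pvCand ((10:Int) ^ H) :=
        lt_of_lt_of_le hjfail (pvCand_mono hjb.1 (by omega))
      have hys_nil : pvEmit mv ys = [] := by
        rw [hys]
        exact pvEmit_nil_of_head_fail mv _ _ (by
          have : (10:Int)^H * 1 < 10^H * 10 := by nlinarith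
          rw [pow_succ]; nlinarith) hfailH
      rw [hys_nil, List.append_nil]
      unfold pvEmit
      rw [List.takeWhile_append]
      rw [if_neg (by
        intro hlen
        have := (List.takeWhile_sublist (l := xs) _).eq_of_length hlen
        have hall' := List.takeWhile_eq_self_iff.mp this
        have := hall' j hjmem
        simp at this
        omega)]

theorem pvT_gt (mv : Int) :
    mv < pvCand ((10:Int) ^ ((PySem.Int.toChars mv).length / 2)) := by
  set H := (PySem.Int.toChars mv).length / 2 with hH
  refine lt_of_le_of_lt ?_ (pvCand_pow_gt (H := H))
  by_cases hmv : mv ≤ 0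
  · exact le_trans hmv (by positivity)
  · push_neg at hmv
    have h1 : 1 ≤ mv.toNat := by omega
    have hlen : (PySem.Int.toChars mv).length = Nat.log 10 mv.toNat + 1 := by
      rw [pvToChars_eq (by omega), pvRep_len h1]
    have hmlt : mv.toNat < 10 ^ (PySem.Int.toChars mv).length := by
      rw [hlen]
      exact Nat.lt_pow_succ_log_self (by norm_num) _
    have hle : (PySem.Int.toChars mv).length ≤ 2 * H + 1 := by omega
    have : mv < (10:Int) ^ (PySem.Int.toChars mv).length := by
      calc mv = ((mv.toNat : Int)) := (Int.toNat_of_nonneg (by omega)).symm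
        _ < ((10 ^ (PySem.Int.toChars mv).length : Nat) : Int) := by exact_mod_cast hmlt
        _ = (10:Int) ^ (PySem.Int.toChars mv).length := by push_cast; ring
    refine le_of_lt (lt_of_lt_of_le this ?_)
    exact pow_le_pow_right₀ (by norm_num) hle

theorem pvB_eq_emit (mv : Int) :
    generate_part1_nums_alt mv
      = pvEmit mv (PySem.List.pyRange 1 ((10:Int) ^ ((PySem.Int.toChars mv).length / 2)) 1) := by
  set H := (PySem.Int.toChars mv).length / 2 with hH
  have hT1 : (1:Int) ≤ 10 ^ H := one_le_pow₀ (by norm_num)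
  have := pvAltLoop_emit mv ((10:Int) ^ H) (pvT_gt mv) (((10:Int) ^ H - 1).toNat) 1 [] le_rfl hT1 le_rfl
  simpa [generate_part1_nums_alt] using this

theorem pvA_eq_emit (mv : Int) :
    generate_part1_nums mv
      = pvEmit mv (PySem.List.pyRange 1 ((10:Int) ^ ((PySem.Int.toChars mv).length / 2)) 1) := by
  set L := (PySem.Int.toChars mv).length with hL
  rw [show generate_part1_nums mv
      = (PySem.List.pyRange 2 ((PySem.Chars.len (PySem.Int.toChars mv)) + 1) 2).foldl
        (fun candidates length =>
          pvInner mv (PySem.List.pyRange ((10 : Int) ^ ((PySem.Int.floordiv length 2) - 1).toNat)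
            ((10 : Int) ^ (PySem.Int.floordiv length 2).toNat) 1) candidates) []
      from rfl]
  rw [PySem.Chars.len_eq, ← hL]
  rw [PySem.List.pyRange_of_pos _ _ (show (0:Int) < 2 by norm_num)]
  have hcount : (if (2:Int) < (L:Int) + 1 then (((L:Int) + 1 - 2 + 2 - 1) / 2).toNat else 0) = L / 2 := by
    by_cases h2 : (2:Int) < (L:Int) + 1
    · rw [if_pos h2]
      have : ((L:Int) + 1 - 2 + 2 - 1) = (L:Int) := by ring
      rw [this]
      omega
    · rw [if_neg h2]
      omega
  rw [hcount, List.foldl_map]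
  refine Eq.trans (PySem.List.foldl_congr_mem (List.range (L / 2)) _
    (fun acc k => acc ++ pvEmit mv (PySem.List.pyRange ((10:Int) ^ k) ((10:Int) ^ (k + 1)) 1))
    [] ?_) (pvBlocks_emit mv (L / 2))
  intro acc k hk
  have hfd : PySem.Int.floordiv (2 + 2 * (k:Int)) 2 = (k:Int) + 1 := by
    rw [PySem.Int.floordiv_eq_ediv_of_pos (by norm_num)]
    omega
  have h1 : ((PySem.Int.floordiv (2 + 2 * (k:Int)) 2) - 1).toNat = k := by rw [hfd]; omega
  have h2 : (PySem.Int.floordiv (2 + 2 * (k:Int)) 2).toNat = k + 1 := by rw [hfd]; omega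
  rw [h1, h2]
  rw [pvInner_emit mv _ acc (by
    intro j hj
    have hmem := (PySem.List.mem_pyRange_one).mp hj
    have hp : (1:Int) ≤ 10 ^ k := one_le_pow₀ (by norm_num)
    omega)]

-- ===== VERDICT (by name: the statement is the Claim_ definition above) =====
theorem generate_part1_nums_spec : Claim_equal_generate_part1_nums := by
  intro mv _
  unfold Spec_generate_part1_nums
  rw [pvA_eq_emit, pvB_eq_emit]
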